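-- pv_equiv track=rewrite | github.com/mewamew/wolf_bot | text.py | process_kill_votes
-- ===== SOURCE A (Python) =====
-- def process_kill_votes(kill_votes):
--     # 统计每个玩家获得的票数
--     killed_player = -1
--     vote_count = {}
--     for vote in kill_votes:
--         target = vote.get('kill')  # 获取投票目标
--         if target is not None:  # 确保有效投票
--             if target in vote_count:
--                 vote_count[target] += 1
--             else:
--                 vote_count[target] = 1
--
--     if not vote_count:  # 如果没有有效投票
--         return -1
--
--     # 找出最高票数
--     max_votes = max(vote_count.values())
--
--     # 找出获得最高票数的玩家
--     candidates = [player for player, votes in vote_count.items() if votes == max_votes]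
--
--     # 如果只有一个人得票最高，处决该玩家
--     if len(candidates) == 1:
--         killed_player = candidates[0]
--     return killed_player
-- ===== SOURCE B (Python) =====
-- def process_kill_votes(kill_votes):
--     # tally valid votes, then pick the unique strict-max player in one pass with a tie flag
--     tally = {}
--     for vote in kill_votes:
--         t = vote.get('kill')
--         if t is not None:
--             tally[t] = tally.get(t, 0) + 1
--     best_p, best_c, tied = -1, 0, False
--     for p, c in tally.items():
--         if c > best_c:
--             best_p, best_c, tied = p, c, False
--         elif c == best_c:
--             tied = True
--     return -1 if tied else best_p
-- ===== Notes on version B (the rewrite author's own statement) =====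
-- stated objective: simpler
-- what changed: Replaces A's three extraction passes over the tally (max of values, filter candidates, length check) by a single fold that tracks the running best player with a tie flag.
import Mathlib
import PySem

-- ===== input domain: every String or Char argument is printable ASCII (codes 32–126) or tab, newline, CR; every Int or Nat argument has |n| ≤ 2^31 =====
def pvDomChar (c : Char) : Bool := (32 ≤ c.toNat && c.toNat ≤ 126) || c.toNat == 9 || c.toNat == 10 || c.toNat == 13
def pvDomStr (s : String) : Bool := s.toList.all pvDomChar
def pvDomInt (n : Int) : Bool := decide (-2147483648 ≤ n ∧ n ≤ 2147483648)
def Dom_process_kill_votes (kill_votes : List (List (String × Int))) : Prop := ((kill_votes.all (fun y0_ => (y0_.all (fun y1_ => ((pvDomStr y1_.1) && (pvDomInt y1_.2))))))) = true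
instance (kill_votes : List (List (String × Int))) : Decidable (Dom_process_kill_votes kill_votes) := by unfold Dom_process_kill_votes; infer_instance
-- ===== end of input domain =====

-- B replaces A's three extraction passes over the tally (max of values, filter of candidates, length test)
-- by a single fold that tracks the running best player with a tie flag; proved to return the same value.

-- ===== PORT A =====
-- vote.get('kill'): first-match association-list lookup (the dict convention)
def pvGetKill (vote : List (String × Int)) : Option Int :=
  (vote.find? (fun p => p.1 == "kill")).map (·.2)

def process_kill_votes (kill_votes : List (List (String × Int))) : Int :=
  let vote_count : PySem.Dict Int Int :=
    kill_votes.foldl (fun d vote =>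
      match pvGetKill vote with
      | none => d
      | some target =>
          if d.contains target then d.modify target 0 (· + 1) else d.insert target 1)
      PySem.Dict.empty
  if vote_count.items = [] then -1
  else
    match PySem.List.max? vote_count.values (fun v => v) with
    | none => -1
    | some max_votes =>
        if ((vote_count.items.filter (fun p => p.2 == max_votes)).map (·.1)).length = 1 then
          ((vote_count.items.filter (fun p => p.2 == max_votes)).map (·.1)).headD (-1)
        else -1

-- ===== PORT B =====
def process_kill_votes_alt (kill_votes : List (List (String × Int))) : Int :=
  let tally : PySem.Dict Int Int :=
    kill_votes.foldl (fun d vote =>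
      match pvGetKill vote with
      | none => d
      | some t => d.insert t (d.getD t 0 + 1))
      PySem.Dict.empty
  let s : Int × Int × Bool :=
    tally.items.foldl (fun st pc =>
      if st.2.1 < pc.2 then (pc.1, pc.2, false)
      else if pc.2 = st.2.1 then (st.1, st.2.1, true)
      else st)
      (-1, 0, false)
  if s.2.2 then -1 else s.1

-- ===== PRECONDITION & SPEC =====
def Spec_process_kill_votes (kill_votes : List (List (String × Int))) (out : Int) : Prop := out = process_kill_votes_alt kill_votes
instance (kill_votes : List (List (String × Int))) (out : Int) : Decidable (Spec_process_kill_votes kill_votes out) := by unfold Spec_process_kill_votes; infer_instance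

-- ===== CLAIM (what is proved, stated in full; the proofs are below) =====
def Claim_equal_process_kill_votes : Prop := ∀ (kill_votes : List (List (String × Int))), Dom_process_kill_votes kill_votes → Spec_process_kill_votes kill_votes (process_kill_votes kill_votes)

-- ===== LEMMAS AND PROOFS =====
-- fold with an Option match = fold over the filterMap
lemma foldl_match_filterMap (f : PySem.Dict Int Int → Int → PySem.Dict Int Int) :
    ∀ (l : List (List (String × Int))) (d : PySem.Dict Int Int),
    l.foldl (fun d vote => match pvGetKill vote with | none => d | some t => f d t) d
      = (l.filterMap pvGetKill).foldl f d := by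
  intro l
  induction l with
  | nil => intro d; rfl
  | cons v t ih =>
      intro d
      cases h : pvGetKill v <;> simp [h, ih]

-- A's tally step equals B's tally step
lemma tally_step_eq (d : PySem.Dict Int Int) (t : Int) :
    (if d.contains t then d.modify t 0 (· + 1) else d.insert t 1)
      = d.insert t (d.getD t 0 + 1) := by
  by_cases h : d.contains t
  · simp [h]; rfl
  · simp [h, PySem.Dict.getD_of_not_contains d 0 (by simpa using h)]

-- a running max is attained by the seed or a list element
lemma foldl_max_mem (l : List Int) (a : Int) : l.foldl max a ∈ a :: l := by
  induction l generalizing a with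
  | nil => simp
  | cons x t ih =>
      have h1 := ih (max a x)
      simp only [List.foldl_cons]
      rcases List.mem_cons.mp h1 with h1 | h1
      · rcases max_choice a x with hm | hm <;> rw [hm] at h1 ⊢ <;> simp [h1]
      · simp [h1]

-- characterization of B's one-pass fold on a list of positive counts
lemma foldB_char (l : List (Int × Int)) :
    (∀ x ∈ l, 1 ≤ x.2) →
    l.foldl (fun st pc =>
        if st.2.1 < pc.2 then (pc.1, pc.2, false)
        else if pc.2 = st.2.1 then (st.1, st.2.1, true)
        else st) ((-1 : Int), (0 : Int), false)
      = ( ((l.find? (fun x => x.2 == (l.map (·.2)).foldl max 0)).map (·.1)).getD (-1),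
          (l.map (·.2)).foldl max 0,
          decide (2 ≤ (l.filter (fun x => x.2 == (l.map (·.2)).foldl max 0)).length) ) := by
  induction l using List.reverseRecOn with
  | nil => intro _; rfl
  | append_singleton l x ih =>
      intro hpos
      have hposl : ∀ y ∈ l, 1 ≤ y.2 := fun y hy => hpos y (by simp [hy])
      have hx : 1 ≤ x.2 := hpos x (by simp)
      rw [List.foldl_append, ih hposl]
      have hfold : ((l ++ [x]).map (fun y => y.2)).foldl max 0
          = max ((l.map (fun y => y.2)).foldl max 0) x.2 := by
        simp [List.foldl_append]
      rw [hfold]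
      generalize hM : (l.map (fun y => y.2)).foldl max 0 = M
      have hMmax : ∀ y ∈ l, y.2 ≤ M := by
        intro y hy
        exact hM ▸ (PySem.List.le_foldl_max (l.map (·.2)) 0).2 y.2 (List.mem_map_of_mem hy)
      rcases lt_trichotomy M x.2 with hlt | heq | hgt
      · -- new strict max
        rw [max_eq_right hlt.le]
        have hfind : l.find? (fun y => y.2 == x.2) = none := by
          rw [List.find?_eq_none]
          intro y hy
          simp only [beq_iff_eq]
          exact fun h => absurd (h ▸ hMmax y hy) (not_le.mpr hlt)
        have hfilt : l.filter (fun y => y.2 == x.2) = [] := by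
          rw [List.filter_eq_nil_iff]
          intro y hy
          simp only [beq_iff_eq]
          exact fun h => absurd (h ▸ hMmax y hy) (not_le.mpr hlt)
        simp [hlt, List.find?_append, hfind, List.filter_append, hfilt]
      · -- tie with current max
        subst heq
        rw [max_self]
        have hmem0 := foldl_max_mem (l.map (fun y => y.2)) 0
        rw [hM] at hmem0
        have hmem : x.2 ∈ l.map (fun y => y.2) := by
          rcases List.mem_cons.mp hmem0 with h0 | h0
          · omega
          · exact h0
        obtain ⟨y, hy, hy2⟩ := List.mem_map.mp hmem
        have hfind : l.find? (fun z => z.2 == x.2) ≠ none := by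
          intro hn
          have := List.find?_eq_none.mp hn y hy
          simp [hy2] at this
        obtain ⟨w, hw⟩ := Option.ne_none_iff_exists'.mp hfind
        have hfilt : 1 ≤ (l.filter (fun z => z.2 == x.2)).length :=
          List.length_pos_of_mem (List.mem_filter.mpr ⟨hy, by simp [hy2]⟩)
        simp [List.find?_append, hw, List.filter_append]
        omega
      · -- smaller than current max
        rw [max_eq_left hgt.le]
        have hxne : ((fun z : Int × Int => z.2 == M) x) = false := by simp; omega
        simp [not_lt.mpr hgt.le, (ne_of_lt hgt), List.find?_append, List.filter_append, hxne]

-- A's three-pass extraction equals B's one-pass fold, on any tally with positive counts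
lemma extract_eq (d : PySem.Dict Int Int) (hpos : ∀ x ∈ d.items, 1 ≤ x.2) :
    (if d.items = [] then (-1 : Int)
     else
       match PySem.List.max? d.values (fun v => v) with
       | none => -1
       | some max_votes =>
           if ((d.items.filter (fun p => p.2 == max_votes)).map (·.1)).length = 1 then
             ((d.items.filter (fun p => p.2 == max_votes)).map (·.1)).headD (-1)
           else -1)
    = (if (d.items.foldl (fun st pc =>
             if st.2.1 < pc.2 then (pc.1, pc.2, false)
             else if pc.2 = st.2.1 then (st.1, st.2.1, true)
             else st) ((-1 : Int), (0 : Int), false)).2.2 then -1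
       else (d.items.foldl (fun st pc =>
             if st.2.1 < pc.2 then (pc.1, pc.2, false)
             else if pc.2 = st.2.1 then (st.1, st.2.1, true)
             else st) ((-1 : Int), (0 : Int), false)).1) := by
  have hvals : d.values = d.items.map (fun y => y.2) := rfl
  cases hitems : d.items with
  | nil => simp
  | cons p rest =>
      rw [hitems] at hpos
      have hp : (1 : Int) ≤ p.2 := hpos p (by simp)
      rw [hvals, hitems, List.map_cons, PySem.List.max?_id_cons, foldB_char (p :: rest) hpos]
      have hM : ((p :: rest).map (fun y => y.2)).foldl max 0
          = (rest.map (fun y => y.2)).foldl max p.2 := by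
        simp [List.foldl_cons, max_eq_right (by omega : (0 : Int) ≤ p.2)]
      rw [hM]
      have hmem : (rest.map (fun y => y.2)).foldl max p.2 ∈ (p :: rest).map (fun y => y.2) := by
        simpa using foldl_max_mem (rest.map (fun y => y.2)) p.2
      obtain ⟨y, hy, hy2⟩ := List.mem_map.mp hmem
      have hymem : y ∈ (p :: rest).filter
          (fun x => x.2 == (rest.map (fun y => y.2)).foldl max p.2) :=
        List.mem_filter.mpr ⟨hy, by simp [hy2]⟩
      have hge : 1 ≤ ((p :: rest).filter
          (fun x => x.2 == (rest.map (fun y => y.2)).foldl max p.2)).length :=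
        List.length_pos_of_mem hymem
      by_cases hlen : ((p :: rest).filter
          (fun x => x.2 == (rest.map (fun y => y.2)).foldl max p.2)).length = 1
      · obtain ⟨w, hw⟩ := List.length_eq_one_iff.mp hlen
        rw [← List.head?_filter]
        simp [hw]
      · have h2 : 2 ≤ ((p :: rest).filter
            (fun x => x.2 == (rest.map (fun y => y.2)).foldl max p.2)).length := by omega
        simp [List.length_map, hlen, h2]

-- ===== VERDICT (by name: the statement is the Claim_ definition above) =====
theorem process_kill_votes_spec : Claim_equal_process_kill_votes := by
  intro kill_votes _
  unfold Spec_process_kill_votes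
  simp only [process_kill_votes, process_kill_votes_alt]
  rw [foldl_match_filterMap, foldl_match_filterMap]
  have hstep : (fun (d : PySem.Dict Int Int) (target : Int) =>
      if d.contains target then d.modify target 0 (· + 1) else d.insert target 1)
      = fun d target => d.insert target (d.getD target 0 + 1) :=
    funext fun d => funext fun t => tally_step_eq d t
  rw [hstep, PySem.Dict.foldl_insert_getD_add_one_eq_counter]
  apply extract_eq
  rw [PySem.Dict.items_counter]
  intro x hx
  obtain ⟨k, hk, rfl⟩ := List.mem_map.mp hx
  have : 0 < (kill_votes.filterMap pvGetKill).count k :=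
    List.count_pos_iff.mpr ((PySem.Set.mem_ofList _ _).mp hk)
  simpa using this
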